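-- pv_equiv track=rewrite | github.com/surianosapienza/fds-pokemon | src/feature_creation.py | effect_features
-- ===== SOURCE A (Python) =====
-- def effect_features(timeline):
--     features = {}
--     total_effects = ['disable', 'firespin', 'confusion', 'substitute', 'wrap', 'clamp', 'typechange', 'reflect', 'noeffect']
--
--     neg_effects = {'disable', 'firespin', 'confusion', 'wrap', 'clamp'}
--
--     pos_effects = {'substitute', 'reflect'}
--
--     dict_effects_p1 = {effect : 0 for effect in total_effects}
--     dict_effects_p2 = {effect : 0 for effect in total_effects}
--     for turn in timeline:
--         if turn["p1_pokemon_state"].get("effects"):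
--             turn_effects_p1 = turn["p1_pokemon_state"].get("effects")
--             for effect in turn_effects_p1:
--                 if effect in dict_effects_p1:
--                     dict_effects_p1[effect] += 1
--
--         if turn["p2_pokemon_state"].get("effects"):
--             turn_effects_p2 = turn["p2_pokemon_state"].get("effects")
--             for effect in turn_effects_p2:
--                 if effect in dict_effects_p2:
--                     dict_effects_p2[effect] += 1 \
--
--     p1_positive_turns = sum(dict_effects_p1.get(e, 0) for e in pos_effects)
--     p2_positive_turns = sum(dict_effects_p2.get(e, 0) for e in pos_effects)
--
--     p1_negative_turns = sum(dict_effects_p1.get(e, 0) for e in neg_effects)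
--     p2_negative_turns = sum(dict_effects_p2.get(e, 0) for e in neg_effects)
--
--     # We distinguish between two different types of effects
--     # Positive advantage
--     features["p1-p2_positive_effect_diff"] = p1_positive_turns - p2_positive_turns
--
--     # Negative advantage
--     features["p1-p2_negative_effect_diff"] = p2_negative_turns - p1_negative_turns
--
--     return features
-- ===== SOURCE B (Python) =====
-- def effect_features(timeline):
--     pos_effects = {'substitute', 'reflect'}
--     neg_effects = {'disable', 'firespin', 'confusion', 'wrap', 'clamp'}
--     p1_pos = p1_neg = p2_pos = p2_neg = 0
--     for turn in timeline:
--         for effect in turn["p1_pokemon_state"].get("effects") or []: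
--             if effect in pos_effects:
--                 p1_pos += 1
--             if effect in neg_effects:
--                 p1_neg += 1
--         for effect in turn["p2_pokemon_state"].get("effects") or []:
--             if effect in pos_effects:
--                 p2_pos += 1
--             if effect in neg_effects:
--                 p2_neg += 1
--     return {"p1-p2_positive_effect_diff": p1_pos - p2_pos,
--             "p1-p2_negative_effect_diff": p2_neg - p1_neg}
-- ===== Notes on version B (the rewrite author's own statement) =====
-- stated objective: simpler
-- what changed: One pass with four plain integer counters replaces the per-effect count dictionaries and the separate summing-over-sets passes, which are eliminated entirely.
import Mathlib
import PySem

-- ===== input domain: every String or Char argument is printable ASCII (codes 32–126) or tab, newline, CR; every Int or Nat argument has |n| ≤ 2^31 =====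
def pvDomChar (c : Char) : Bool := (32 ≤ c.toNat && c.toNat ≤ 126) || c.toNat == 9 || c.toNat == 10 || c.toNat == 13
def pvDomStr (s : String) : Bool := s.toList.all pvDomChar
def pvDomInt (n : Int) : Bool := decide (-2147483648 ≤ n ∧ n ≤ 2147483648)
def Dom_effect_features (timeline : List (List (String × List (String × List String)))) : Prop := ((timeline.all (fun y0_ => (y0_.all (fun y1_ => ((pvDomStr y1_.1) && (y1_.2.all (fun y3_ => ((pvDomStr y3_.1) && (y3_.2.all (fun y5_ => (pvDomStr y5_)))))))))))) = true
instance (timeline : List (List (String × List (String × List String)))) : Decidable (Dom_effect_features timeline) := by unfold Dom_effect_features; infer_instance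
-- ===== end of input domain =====

-- B replaces A's per-effect count dictionaries and the later summing-over-sets passes by four
-- plain integer counters maintained in the single pass over the timeline (objective: simpler).

-- ===== PORT A =====
-- shared set/list constants of the module
def pvTotalEffects : List String :=
  ["disable", "firespin", "confusion", "substitute", "wrap", "clamp", "typechange", "reflect", "noeffect"]
def pvNegEffects : List String := PySem.Set.ofList ["disable", "firespin", "confusion", "wrap", "clamp"]
def pvPosEffects : List String := PySem.Set.ofList ["substitute", "reflect"]

-- `if effect in dict_effects: dict_effects[effect] += 1`
def pvStepA (d : PySem.Dict String Int) (e : String) : PySem.Dict String Int :=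
  if d.contains e then d.modify e 0 (· + 1) else d

-- the body of `if turn[key].get("effects"): for effect in turn[key].get("effects"): …`
-- (the `turn[key]` lookup itself raises KeyError on a missing key: excluded by Pre_; getD is used there)
def pvTurnA (d : PySem.Dict String Int) (stateD : List (String × List String)) : PySem.Dict String Int :=
  match (PySem.Dict.mk stateD).get? "effects" with
  | some l => if l.isEmpty then d else l.foldl pvStepA d
  | none => d

def effect_features (timeline : List (List (String × List (String × List String)))) : List (String × Int) :=
  let dict0 : PySem.Dict String Int := pvTotalEffects.foldl (fun d e => d.insert e 0) PySem.Dict.empty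
  let r := timeline.foldl
    (fun (p : PySem.Dict String Int × PySem.Dict String Int) turn =>
      (pvTurnA p.1 ((PySem.Dict.mk turn).getD "p1_pokemon_state" []),
       pvTurnA p.2 ((PySem.Dict.mk turn).getD "p2_pokemon_state" [])))
    (dict0, dict0)
  let p1_pos := pvPosEffects.foldl (fun s e => s + r.1.getD e 0) 0
  let p2_pos := pvPosEffects.foldl (fun s e => s + r.2.getD e 0) 0
  let p1_neg := pvNegEffects.foldl (fun s e => s + r.1.getD e 0) 0
  let p2_neg := pvNegEffects.foldl (fun s e => s + r.2.getD e 0) 0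
  [("p1-p2_positive_effect_diff", p1_pos - p2_pos),
   ("p1-p2_negative_effect_diff", p2_neg - p1_neg)]

-- ===== PORT B =====
-- `turn[key].get("effects") or []`
def pvEffectsOf (stateD : List (String × List String)) : List String :=
  ((PySem.Dict.mk stateD).get? "effects").getD []

-- the two `if effect in …: counter += 1` statements of one inner loop iteration
def pvStepB (a : Int × Int) (e : String) : Int × Int :=
  (a.1 + (if pvPosEffects.contains e then 1 else 0),
   a.2 + (if pvNegEffects.contains e then 1 else 0))

def effect_features_alt (timeline : List (List (String × List (String × List String)))) : List (String × Int) :=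
  let r := timeline.foldl
    (fun (p : (Int × Int) × (Int × Int)) turn =>
      ((pvEffectsOf ((PySem.Dict.mk turn).getD "p1_pokemon_state" [])).foldl pvStepB p.1,
       (pvEffectsOf ((PySem.Dict.mk turn).getD "p2_pokemon_state" [])).foldl pvStepB p.2))
    ((0, 0), (0, 0))
  [("p1-p2_positive_effect_diff", r.1.1 - r.2.1),
   ("p1-p2_negative_effect_diff", r.2.2 - r.1.2)]

-- ===== PRECONDITION & SPEC =====
-- Pre_ excludes exactly the timelines with a turn missing the "p1_pokemon_state" or
-- "p2_pokemon_state" key, on which the Python A raises KeyError.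
def Pre_effect_features (timeline : List (List (String × List (String × List String)))) : Prop :=
  timeline.all (fun t => ((PySem.Dict.mk t).get? "p1_pokemon_state").isSome
      && ((PySem.Dict.mk t).get? "p2_pokemon_state").isSome) = true
instance (timeline : List (List (String × List (String × List String)))) : Decidable (Pre_effect_features timeline) := by unfold Pre_effect_features; infer_instance

def pvWitness_effect_features : (List (List (String × List (String × List String)))) :=
  [[("p1_pokemon_state", [("effects", ["confusion", "substitute"])]),
    ("p2_pokemon_state", [("effects", ["wrap"])])],
   [("p1_pokemon_state", []), ("p2_pokemon_state", [("effects", [])])]]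

def Spec_effect_features (timeline : List (List (String × List (String × List String)))) (out : List (String × Int)) : Prop := out = effect_features_alt timeline
instance (timeline : List (List (String × List (String × List String)))) (out : List (String × Int)) : Decidable (Spec_effect_features timeline out) := by unfold Spec_effect_features; infer_instance

-- ===== CLAIM (what is proved, stated in full; the proofs are below) =====
def Claim_equal_effect_features : Prop := ∀ (timeline : List (List (String × List (String × List String)))), Dom_effect_features timeline → Pre_effect_features timeline → Spec_effect_features timeline (effect_features timeline)

-- ===== LEMMAS AND PROOFS =====

-- the inner A loop never changes the key set
theorem contains_foldl_pvStepA (l : List String) (d : PySem.Dict String Int) (v : String) :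
    (l.foldl pvStepA d).contains v = d.contains v := by
  induction l generalizing d with
  | nil => rfl
  | cons e l ih =>
    simp only [List.foldl_cons, ih, pvStepA]
    by_cases he : d.contains e = true
    · rw [if_pos he, PySem.Dict.contains_modify]
      by_cases hv : v = e
      · subst hv; simp [he]
      · simp [beq_false_of_ne hv]
    · rw [if_neg he]

-- the inner A loop adds the multiplicity of each present key
theorem getD_foldl_pvStepA (l : List String) (d : PySem.Dict String Int) (v : String)
    (hv : d.contains v = true) :
    (l.foldl pvStepA d).getD v 0 = d.getD v 0 + (l.count v : Int) := by
  induction l generalizing d with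
  | nil => simp
  | cons e l ih =>
    simp only [List.foldl_cons, pvStepA]
    by_cases he : d.contains e = true
    · rw [if_pos he]
      have hc : (d.modify e 0 (· + 1)).contains v = true := by
        rw [PySem.Dict.contains_modify, hv, Bool.or_true]
      rw [ih _ hc, PySem.Dict.getD_modify, List.count_cons]
      by_cases hve : v = e
      · subst hve
        rw [if_pos rfl, if_pos (by simp)]
        push_cast; ring
      · rw [if_neg hve, if_neg (by simp [Ne.symm hve])]
        push_cast; ring
    · rw [if_neg he, ih _ hv, List.count_cons,
        if_neg (by simp; rintro rfl; exact he hv)]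
      push_cast; ring

theorem pvTurnA_eq_foldl (d : PySem.Dict String Int) (st : List (String × List String)) :
    pvTurnA d st = (pvEffectsOf st).foldl pvStepA d := by
  unfold pvTurnA pvEffectsOf
  match (PySem.Dict.mk st).get? "effects" with
  | none => rfl
  | some l =>
    simp only [Option.getD_some]
    cases l <;> simp

-- counting membership in a cons'ed set splits off the head's multiplicity
theorem countP_contains_cons (s : String) (S : List String) (hs : s ∉ S) (l : List String) :
    l.countP (fun e => (s :: S).contains e) = l.count s + l.countP (fun e => S.contains e) := by
  induction l with
  | nil => simp
  | cons e l ih =>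
    rw [List.countP_cons, List.countP_cons, List.count_cons, ih, List.contains_cons]
    by_cases he : e = s
    · subst he
      simp [hs]
      omega
    · simp [beq_false_of_ne he]
      split <;> omega

theorem countP_pos (l : List String) :
    l.countP (fun e => pvPosEffects.contains e) = l.count "substitute" + l.count "reflect" := by
  show l.countP (fun e => ("substitute" :: ["reflect"]).contains e) = _
  rw [countP_contains_cons _ _ (by decide), countP_contains_cons _ _ (by decide)]
  simp

theorem countP_neg (l : List String) :
    l.countP (fun e => pvNegEffects.contains e) =
      l.count "disable" + (l.count "firespin" + (l.count "confusion" + (l.count "wrap" + l.count "clamp"))) := by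
  show l.countP (fun e => ("disable" :: "firespin" :: "confusion" :: "wrap" :: ["clamp"]).contains e) = _
  rw [countP_contains_cons _ _ (by decide), countP_contains_cons _ _ (by decide),
    countP_contains_cons _ _ (by decide), countP_contains_cons _ _ (by decide),
    countP_contains_cons _ _ (by decide)]
  simp

-- the inner B loop counts pos/neg memberships
theorem foldl_pvStepB (l : List String) (a : Int × Int) :
    l.foldl pvStepB a = (a.1 + (l.countP (fun e => pvPosEffects.contains e) : Int),
                         a.2 + (l.countP (fun e => pvNegEffects.contains e) : Int)) := by
  induction l generalizing a with
  | nil => simp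
  | cons e l ih =>
    rw [List.foldl_cons, ih]
    simp only [pvStepB, List.countP_cons, Prod.mk.injEq]
    constructor <;> (split <;> (push_cast; ring))

-- key-presence invariant for A's dictionaries
def pvKp (d : PySem.Dict String Int) : Prop :=
  d.contains "substitute" = true ∧ d.contains "reflect" = true ∧ d.contains "disable" = true ∧
  d.contains "firespin" = true ∧ d.contains "confusion" = true ∧ d.contains "wrap" = true ∧
  d.contains "clamp" = true

theorem pvKp_foldl (l : List String) (d : PySem.Dict String Int) (h : pvKp d) :
    pvKp (l.foldl pvStepA d) := by
  unfold pvKp at *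
  simp only [contains_foldl_pvStepA]
  exact h

-- A-side sums over the pos/neg sets, as closed expressions
def pvSumPos (d : PySem.Dict String Int) : Int := pvPosEffects.foldl (fun s e => s + d.getD e 0) 0
def pvSumNeg (d : PySem.Dict String Int) : Int := pvNegEffects.foldl (fun s e => s + d.getD e 0) 0

theorem pvSumPos_foldl (l : List String) (d : PySem.Dict String Int) (h : pvKp d) :
    pvSumPos (l.foldl pvStepA d) = pvSumPos d + (l.countP (fun e => pvPosEffects.contains e) : Int) := by
  obtain ⟨h1, h2, -⟩ := h
  unfold pvSumPos
  show 0 + (l.foldl pvStepA d).getD "substitute" 0 + (l.foldl pvStepA d).getD "reflect" 0 = _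
  rw [getD_foldl_pvStepA _ _ _ h1, getD_foldl_pvStepA _ _ _ h2, countP_pos]
  push_cast
  show _ = 0 + d.getD "substitute" 0 + d.getD "reflect" 0 + _
  ring

theorem pvSumNeg_foldl (l : List String) (d : PySem.Dict String Int) (h : pvKp d) :
    pvSumNeg (l.foldl pvStepA d) = pvSumNeg d + (l.countP (fun e => pvNegEffects.contains e) : Int) := by
  obtain ⟨-, -, h3, h4, h5, h6, h7⟩ := h
  unfold pvSumNeg
  show 0 + (l.foldl pvStepA d).getD "disable" 0 + (l.foldl pvStepA d).getD "firespin" 0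
      + (l.foldl pvStepA d).getD "confusion" 0 + (l.foldl pvStepA d).getD "wrap" 0
      + (l.foldl pvStepA d).getD "clamp" 0 = _
  rw [getD_foldl_pvStepA _ _ _ h3, getD_foldl_pvStepA _ _ _ h4, getD_foldl_pvStepA _ _ _ h5,
    getD_foldl_pvStepA _ _ _ h6, getD_foldl_pvStepA _ _ _ h7, countP_neg]
  push_cast
  show _ = 0 + d.getD "disable" 0 + d.getD "firespin" 0 + d.getD "confusion" 0
      + d.getD "wrap" 0 + d.getD "clamp" 0 + _
  ring

-- the two outer folds run in lockstep
theorem main_inv (timeline : List (List (String × List (String × List String))))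
    (d1 d2 : PySem.Dict String Int) (h1 : pvKp d1) (h2 : pvKp d2) :
    timeline.foldl
      (fun (p : (Int × Int) × (Int × Int)) turn =>
        ((pvEffectsOf ((PySem.Dict.mk turn).getD "p1_pokemon_state" [])).foldl pvStepB p.1,
         (pvEffectsOf ((PySem.Dict.mk turn).getD "p2_pokemon_state" [])).foldl pvStepB p.2))
      ((pvSumPos d1, pvSumNeg d1), (pvSumPos d2, pvSumNeg d2))
    = (fun (p : PySem.Dict String Int × PySem.Dict String Int) =>
        ((pvSumPos p.1, pvSumNeg p.1), (pvSumPos p.2, pvSumNeg p.2)))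
      (timeline.foldl
        (fun (p : PySem.Dict String Int × PySem.Dict String Int) turn =>
          (pvTurnA p.1 ((PySem.Dict.mk turn).getD "p1_pokemon_state" []),
           pvTurnA p.2 ((PySem.Dict.mk turn).getD "p2_pokemon_state" [])))
        (d1, d2)) := by
  induction timeline generalizing d1 d2 with
  | nil => rfl
  | cons turn rest ih =>
    simp only [List.foldl_cons]
    rw [foldl_pvStepB, foldl_pvStepB, pvTurnA_eq_foldl, pvTurnA_eq_foldl,
      ← pvSumPos_foldl _ _ h1, ← pvSumNeg_foldl _ _ h1,
      ← pvSumPos_foldl _ _ h2, ← pvSumNeg_foldl _ _ h2]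
    exact ih _ _ (pvKp_foldl _ _ h1) (pvKp_foldl _ _ h2)

-- ===== VERDICT (by name: the statement is the Claim_ definition above) =====
theorem effect_features_spec : Claim_equal_effect_features := by
  intro timeline _ _
  show effect_features timeline = effect_features_alt timeline
  unfold effect_features effect_features_alt
  have h0 : pvKp (pvTotalEffects.foldl (fun d e => d.insert e 0) PySem.Dict.empty) := by
    unfold pvKp; decide
  have hmain := main_inv timeline _ _ h0 h0
  have hs0 : pvSumPos (pvTotalEffects.foldl (fun d e => d.insert e 0) PySem.Dict.empty) = 0 := by decide
  have hn0 : pvSumNeg (pvTotalEffects.foldl (fun d e => d.insert e 0) PySem.Dict.empty) = 0 := by decide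
  rw [hs0, hn0] at hmain
  simp only [hmain, pvSumPos, pvSumNeg]
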